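-- pv_equiv track=rewrite | github.com/shami-ah/pdf-data-extractor | extract_red_text.py | coalesce_numeric_runs
-- ===== SOURCE A (Python) =====
-- def coalesce_numeric_runs(text_list):
--     """
--     If a cell yields ['4','5','6','9','8','7','1','2','3'] etc., join continuous single-char digit runs.
--     Returns ['456987123'] instead of many singles. Non-digit tokens are preserved.
--     """
--     out, buf = [], []
--     for t in text_list:
--         if len(t) == 1 and t.isdigit():
--             buf.append(t)
--         else:
--             if buf:
--                 out.append("".join(buf))
--                 buf = []
--             out.append(t)
--     if buf:
--         out.append("".join(buf))
--     return out
-- ===== SOURCE B (Python) =====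
-- def coalesce_numeric_runs(text_list):
--     # Two-pointer run scanner: the outer loop consumes one maximal single-digit
--     # run (or one non-digit token) per iteration via an inner index scan;
--     # no buffer / flush-at-end state machine.
--     out = []
--     i, n = 0, len(text_list)
--     while i < n:
--         t = text_list[i]
--         if len(t) == 1 and t.isdigit():
--             j = i + 1
--             while j < n and len(text_list[j]) == 1 and text_list[j].isdigit():
--                 j += 1
--             out.append("".join(text_list[i:j]))
--             i = j
--         else:
--             out.append(t)
--             i += 1
--     return out
-- ===== Notes on version B (the rewrite author's own statement) =====
-- stated objective: alternative
-- what changed: Replaces A's per-token buffer/flush state machine with a two-pointer run scanner: an outer loop that consumes one maximal single-digit run (found by an inner index scan) or one non-digit token per iteration, joining the run's slice directly.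
import Mathlib
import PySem

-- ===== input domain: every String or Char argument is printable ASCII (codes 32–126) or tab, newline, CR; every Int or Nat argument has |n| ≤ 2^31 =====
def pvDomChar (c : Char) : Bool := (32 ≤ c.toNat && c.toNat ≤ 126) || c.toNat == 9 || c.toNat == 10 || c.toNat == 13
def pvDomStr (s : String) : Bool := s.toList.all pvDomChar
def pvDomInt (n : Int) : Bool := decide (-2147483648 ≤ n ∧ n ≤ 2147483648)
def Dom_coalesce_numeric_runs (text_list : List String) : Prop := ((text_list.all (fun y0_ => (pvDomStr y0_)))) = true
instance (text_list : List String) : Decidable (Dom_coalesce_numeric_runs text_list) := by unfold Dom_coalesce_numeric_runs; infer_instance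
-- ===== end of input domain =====

-- B replaces A's per-token buffer/flush state machine with a two-pointer run scanner
-- (outer loop consumes one maximal digit run per iteration); alternative decomposition,
-- same return value, same O(n) cost.
-- the Python predicate `len(t) == 1 and t.isdigit()`
def pvKey (t : String) : Bool := PySem.Str.len t == 1 && PySem.Str.strIsdigit t
-- ===== PORT A =====
-- loop body of A's for-loop, over the state (out, buf)
def pvStepA (st : List String × List String) (t : String) : List String × List String :=
  if pvKey t then
    (st.1, st.2 ++ [t])
  else
    ((if st.2 ≠ [] then st.1 ++ [PySem.Str.join "" st.2] else st.1) ++ [t], [])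
def coalesce_numeric_runs (text_list : List String) : List String :=
  let s := text_list.foldl pvStepA ([], [])
  if s.2 ≠ [] then s.1 ++ [PySem.Str.join "" s.2] else s.1
-- ===== PORT B =====
-- B's outer while-loop over the index pair (i, j) is represented by recursion on the
-- suffix text_list[i:]; B's inner index scan `while j < n and isdigit…` computing the
-- maximal run text_list[i:j] is takeWhile/dropWhile on that suffix (exact).
def pvScanB : List String → List String
  | [] => []
  | t :: ts =>
    if pvKey t then
      PySem.Str.join "" (t :: ts.takeWhile pvKey) :: pvScanB (ts.dropWhile pvKey)
    else
      t :: pvScanB ts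
  termination_by l => l.length
  decreasing_by
  · exact Nat.lt_succ_of_le (List.length_dropWhile_le _ _)
  · simp
def coalesce_numeric_runs_alt (text_list : List String) : List String :=
  pvScanB text_list
-- ===== PRECONDITION & SPEC =====
def Spec_coalesce_numeric_runs (text_list : List String) (out : List String) : Prop := out = coalesce_numeric_runs_alt text_list
instance (text_list : List String) (out : List String) : Decidable (Spec_coalesce_numeric_runs text_list out) := by unfold Spec_coalesce_numeric_runs; infer_instance
-- ===== CLAIM (what is proved, stated in full; the proofs are below) =====
def Claim_equal_coalesce_numeric_runs : Prop := ∀ (text_list : List String), Dom_coalesce_numeric_runs text_list → Spec_coalesce_numeric_runs text_list (coalesce_numeric_runs text_list)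
-- ===== LEMMAS AND PROOFS =====
-- A's flush-at-end step
def pvFinish (s : List String × List String) : List String :=
  if s.2 ≠ [] then s.1 ++ [PySem.Str.join "" s.2] else s.1
-- one step of A shifts the accumulated `out` prefix
lemma pvStepShift (t : String) (out buf : List String) :
    pvStepA (out, buf) t = (out ++ (pvStepA ([], buf) t).1, (pvStepA ([], buf) t).2) := by
  by_cases hk : pvKey t = true <;> cases buf <;> simp [pvStepA, hk]
-- the accumulated `out` only collects a prefix of the final result
lemma pvShift : ∀ (l : List String) (out buf : List String),
    l.foldl pvStepA (out, buf)
      = (out ++ (l.foldl pvStepA ([], buf)).1, (l.foldl pvStepA ([], buf)).2) := by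
  intro l
  induction l with
  | nil => intro out buf; simp
  | cons t ts ih =>
    intro out buf
    rw [List.foldl_cons, List.foldl_cons, pvStepShift t out buf]
    rcases h : pvStepA ([], buf) t with ⟨o1, b1⟩
    rw [ih (out ++ o1) b1, ih o1 b1]
    simp
lemma pvShiftFinish (l : List String) (out buf : List String) :
    pvFinish (l.foldl pvStepA (out, buf)) = out ++ pvFinish (l.foldl pvStepA ([], buf)) := by
  rw [pvShift]
  unfold pvFinish
  split_ifs <;> simp
-- feeding a run of digit tokens just extends the buffer
lemma pvDigits : ∀ (d : List String) (r out buf : List String),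
    (∀ x ∈ d, pvKey x = true) →
    (d ++ r).foldl pvStepA (out, buf) = r.foldl pvStepA (out, buf ++ d) := by
  intro d
  induction d with
  | nil => intro r out buf _; simp
  | cons x xs ih =>
    intro r out buf h
    have hx : pvKey x = true := h x (by simp)
    simp only [List.cons_append, List.foldl_cons, pvStepA, hx, if_pos]
    rw [ih r out (buf ++ [x]) (fun y hy => h y (by simp [hy]))]
    simp
-- main lemma: B's run scanner computes A's fold-with-buffer result
lemma pvMain : ∀ (n : ℕ) (l : List String), l.length ≤ n →
    pvScanB l = pvFinish (l.foldl pvStepA ([], [])) := by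
  intro n
  induction n with
  | zero =>
    intro l hl
    have : l = [] := List.eq_nil_of_length_eq_zero (Nat.le_zero.mp hl)
    subst this
    simp [pvScanB, pvFinish]
  | succ n ih =>
    intro l hl
    cases l with
    | nil => simp [pvScanB, pvFinish]
    | cons t ts =>
      by_cases hk : pvKey t = true
      · -- digit run: t :: takeWhile ++ dropWhile
        have hsplit : t :: ts = (t :: ts.takeWhile pvKey) ++ ts.dropWhile pvKey := by
          simp [List.takeWhile_append_dropWhile]
        rw [pvScanB]
        simp only [hk, if_pos]
        conv_rhs => rw [hsplit]
        rw [pvDigits (t :: ts.takeWhile pvKey) (ts.dropWhile pvKey) [] []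
          (by
            intro x hx
            rcases List.mem_cons.mp hx with h1 | h2
            · subst h1; exact hk
            · exact List.mem_takeWhile_imp h2)]
        simp only [List.nil_append]
        -- now analyse the rest, whose head (if any) is not a digit token
        rcases hdw : ts.dropWhile pvKey with _ | ⟨x, r'⟩
        · simp [pvScanB, pvFinish]
        · have hx : pvKey x = false := by
            have := List.head?_dropWhile_not pvKey ts
            rw [hdw] at this
            simpa using this
          have hlen : r'.length + 1 ≤ n := by
            have h1 : (ts.dropWhile pvKey).length ≤ ts.length := List.length_dropWhile_le _ _
            rw [hdw] at h1
            simp only [List.length_cons] at h1 hl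
            omega
          rw [List.foldl_cons]
          have hstep : pvStepA ([], t :: ts.takeWhile pvKey) x
              = ([PySem.Str.join "" (t :: ts.takeWhile pvKey), x], []) := by
            simp [pvStepA, hx]
          rw [hstep, pvShiftFinish]
          have hstep2 : pvStepA ([], []) x = ([x], []) := by simp [pvStepA, hx]
          have hr : pvScanB (x :: r') = [x] ++ pvFinish (r'.foldl pvStepA ([], [])) := by
            rw [ih (x :: r') (by simp only [List.length_cons]; omega), List.foldl_cons,
              hstep2, pvShiftFinish]
          rw [hr]
          simp
      · simp only [Bool.not_eq_true] at hk
        rw [pvScanB]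
        simp only [hk, Bool.false_eq_true, if_neg, not_false_iff]
        rw [List.foldl_cons]
        have hstep : pvStepA ([], []) t = ([t], []) := by simp [pvStepA, hk]
        rw [hstep, pvShiftFinish]
        rw [ih ts (by simpa using Nat.le_of_succ_le_succ hl)]
        simp
-- ===== VERDICT (by name: the statement is the Claim_ definition above) =====
theorem coalesce_numeric_runs_spec : Claim_equal_coalesce_numeric_runs := by
  intro l _
  unfold Spec_coalesce_numeric_runs coalesce_numeric_runs coalesce_numeric_runs_alt
  exact (pvMain l.length l le_rfl).symm
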